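-- pv_equiv track=rewrite | github.com/Pranavi2002/CodePath-TP-102-Course | Unit-2/s2v1p3.py | navigate_research_station
-- ===== SOURCE A (Python) =====
-- def navigate_research_station(station_layout, observations):
--     # Map station characters to their indices
--     index_map = {char: idx for idx, char in enumerate(station_layout)}
--
--     total_time = 0
--     current_index = 0  # Start at index 0 of station_layout (not of observations)
--
--     for ch in observations:
--         next_index = index_map[ch]
--         total_time += abs(next_index - current_index)
--         current_index = next_index
--
--     return total_time
-- ===== SOURCE B (Python) =====
-- def navigate_research_station(station_layout, observations):
--     # Count, for each unit gap of the corridor, how many traversals cross it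
--     # (difference array + prefix-sum sweep); the answer is the total crossing count.
--     index_map = {char: idx for idx, char in enumerate(station_layout)}
--     diff = [0] * (len(station_layout) + 1)
--     current = 0
--     for ch in observations:
--         nxt = index_map[ch]
--         lo, hi = (current, nxt) if current <= nxt else (nxt, current)
--         diff[lo] += 1
--         diff[hi] -= 1
--         current = nxt
--     total = 0
--     running = 0
--     for d in diff:
--         running += d
--         total += running
--     return total
-- ===== Notes on version B (the rewrite author's own statement) =====
-- stated objective: alternative
-- what changed: Instead of summing absolute differences along the walk, B counts for every unit gap of the corridor how many traversals cross it, via a difference array updated per move and a final prefix-sum sweep; the total crossing count equals the total travel time.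
import Mathlib
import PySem

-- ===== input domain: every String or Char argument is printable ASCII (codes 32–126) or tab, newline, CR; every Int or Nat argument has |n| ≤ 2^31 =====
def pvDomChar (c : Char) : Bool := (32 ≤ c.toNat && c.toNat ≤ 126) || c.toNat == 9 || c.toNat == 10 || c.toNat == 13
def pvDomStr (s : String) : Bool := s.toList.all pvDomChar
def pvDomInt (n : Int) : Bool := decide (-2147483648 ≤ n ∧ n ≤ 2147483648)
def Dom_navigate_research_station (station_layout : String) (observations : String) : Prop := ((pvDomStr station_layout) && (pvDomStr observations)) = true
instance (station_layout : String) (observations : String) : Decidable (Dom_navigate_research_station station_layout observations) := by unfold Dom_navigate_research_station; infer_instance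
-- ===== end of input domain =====

-- B replaces A's sum of absolute index differences by a gap-crossing count: a difference array updated per move, then a prefix-sum sweep (objective: alternative algorithm, same cost).

-- ===== PORT A =====
-- index_map = {char: idx for idx, char in enumerate(station_layout)}  (both Pythons build this dict)
def pvIndexMap (station_layout : String) : PySem.Dict Char Int :=
  (PySem.List.enumerate station_layout.toList 0).foldl
    (fun d p => d.insert p.2 p.1) PySem.Dict.empty

def navigate_research_station (station_layout : String) (observations : String) : Int :=
  let index_map := pvIndexMap station_layout
  -- Python raises KeyError on a missing char; Pre_ excludes that, the port's default 0 is never claimed about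
  let s := observations.toList.foldl
    (fun (s : Int × Int) ch =>
      let next_index := index_map.getD ch 0
      (s.1 + |next_index - s.2|, next_index)) (0, 0)
  s.1

-- ===== PORT B =====
def navigate_research_station_alt (station_layout : String) (observations : String) : Int :=
  let index_map := pvIndexMap station_layout
  let diff0 : List Int := List.replicate (station_layout.toList.length + 1) 0
  let s := observations.toList.foldl
    (fun (s : List Int × Int) ch =>
      let nxt := index_map.getD ch 0
      let lohi := if s.2 ≤ nxt then (s.2, nxt) else (nxt, s.2)
      let d1 := PySem.List.pySetD s.1 lohi.1 (PySem.List.pyGetD s.1 lohi.1 0 + 1)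
      let d2 := PySem.List.pySetD d1 lohi.2 (PySem.List.pyGetD d1 lohi.2 0 - 1)
      (d2, nxt)) (diff0, 0)
  let r := s.1.foldl (fun (p : Int × Int) x => (p.1 + x, p.2 + (p.1 + x))) (0, 0)
  r.2

-- ===== PRECONDITION & SPEC =====
-- Pre_ excludes exactly the inputs where Python A raises KeyError: an observation char absent from the layout.
def Pre_navigate_research_station (station_layout : String) (observations : String) : Prop :=
  (observations.toList.all (fun c => station_layout.toList.contains c)) = true
instance (station_layout : String) (observations : String) : Decidable (Pre_navigate_research_station station_layout observations) := by unfold Pre_navigate_research_station; infer_instance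

def pvWitness_navigate_research_station : String × String := ("abc", "cab")

def Spec_navigate_research_station (station_layout : String) (observations : String) (out : Int) : Prop := out = navigate_research_station_alt station_layout observations
instance (station_layout : String) (observations : String) (out : Int) : Decidable (Spec_navigate_research_station station_layout observations out) := by unfold Spec_navigate_research_station; infer_instance

-- ===== CLAIM (what is proved, stated in full; the proofs are below) =====
def Claim_equal_navigate_research_station : Prop := ∀ (station_layout : String) (observations : String), Dom_navigate_research_station station_layout observations → Pre_navigate_research_station station_layout observations → Spec_navigate_research_station station_layout observations (navigate_research_station station_layout observations)

-- ===== LEMMAS AND PROOFS =====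

-- the prefix-sum sweep of B's second loop, as a structural recursion (proof helper)
def pvSweep (run : Int) : List Int → Int
  | [] => 0
  | x :: xs => (run + x) + pvSweep (run + x) xs

theorem pv_sweep_foldl : ∀ (l : List Int) (run tot : Int),
    l.foldl (fun (p : Int × Int) x => (p.1 + x, p.2 + (p.1 + x))) (run, tot)
      = (run + l.sum, tot + pvSweep run l) := by
  intro l
  induction l with
  | nil => intro run tot; simp [pvSweep]
  | cons x xs ih =>
      intro run tot
      simp only [List.foldl_cons, List.sum_cons, pvSweep, ih]
      refine Prod.ext ?_ ?_ <;> simp <;> ring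

theorem pv_sweep_shift : ∀ (l : List Int) (run v : Int),
    pvSweep (run + v) l = pvSweep run l + v * l.length := by
  intro l
  induction l with
  | nil => intro run v; simp [pvSweep]
  | cons x xs ih =>
      intro run v
      have h : run + v + x = (run + x) + v := by ring
      simp only [pvSweep, h, ih (run + x) v, List.length_cons]
      push_cast
      ring

theorem pv_sweep_set : ∀ (l : List Int) (i : Nat) (run v : Int) (h : i < l.length),
    pvSweep run (l.set i (l[i] + v)) = pvSweep run l + v * ((l.length - i : Nat) : Int) := by
  intro l
  induction l with
  | nil => intro i run v h; simp at h
  | cons x xs ih =>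
      intro i run v h
      cases i with
      | zero =>
          simp only [List.set_cons_zero, List.getElem_cons_zero, pvSweep]
          have h2 : run + (x + v) = (run + x) + v := by ring
          rw [h2, pv_sweep_shift]
          have h3 : (((x :: xs).length - 0 : Nat) : Int) = (xs.length : Int) + 1 := by
            simp
          rw [h3]; ring
      | succ n =>
          have hn : n < xs.length := by simpa using h
          simp only [List.set_cons_succ, List.getElem_cons_succ, pvSweep, ih n (run + x) v hn]
          have h3 : (((x :: xs).length - (n + 1) : Nat) : Int) = ((xs.length - n : Nat) : Int) := by
            simp only [List.length_cons]; omega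
          rw [h3]; ring

theorem pv_sweep_replicate_zero : ∀ (n : Nat) (run : Int),
    pvSweep run (List.replicate n (0 : Int)) = run * n := by
  intro n
  induction n with
  | zero => intro run; simp [pvSweep]
  | succ m ih =>
      intro run
      simp only [List.replicate_succ, pvSweep, add_zero, ih]
      push_cast
      ring

-- A's running fold shifts linearly in its accumulator
theorem pv_afold_shift (f : Char → Int) : ∀ (l : List Char) (t cur : Int),
    (l.foldl (fun (s : Int × Int) ch => (s.1 + |f ch - s.2|, f ch)) (t, cur)).1
      = t + (l.foldl (fun (s : Int × Int) ch => (s.1 + |f ch - s.2|, f ch)) (0, cur)).1 := by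
  intro l
  induction l with
  | nil => intro t cur; simp
  | cons ch rest ih =>
      intro t cur
      simp only [List.foldl_cons]
      rw [ih (t + |f ch - cur|) (f ch), ih (0 + |f ch - cur|) (f ch)]
      ring

-- two difference-array updates (+1 at i, -1 at j) change the sweep total by j - i
theorem pv_set2_sweep (d : List Int) (i j : Nat) (hi : i < d.length) (hj : j < d.length) :
    pvSweep 0 ((d.set i (d[i] + 1)).set j ((d.set i (d[i] + 1))[j]'(by simpa using hj) + (-1)))
      = pvSweep 0 d + ((j : Int) - (i : Int)) := by
  rw [pv_sweep_set (d.set i (d[i] + 1)) j 0 (-1) (by simpa using hj),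
      pv_sweep_set d i 0 1 hi]
  have h1 : ((d.length - i : Nat) : Int) = (d.length : Int) - i := by omega
  have h2 : (((d.set i (d[i] + 1)).length - j : Nat) : Int) = (d.length : Int) - j := by
    simp only [List.length_set]; omega
  rw [h1, h2]
  ring

-- one move of B's difference-array loop adds exactly |nxt - cur| to the sweep total
theorem pv_move_sweep (d : List Int) (cur nxt : Int)
    (hc0 : 0 ≤ cur) (hcl : cur.toNat < d.length)
    (hn0 : 0 ≤ nxt) (hnl : nxt.toNat < d.length) :
    pvSweep 0
      (let lohi := if cur ≤ nxt then (cur, nxt) else (nxt, cur)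
       let d1 := PySem.List.pySetD d lohi.1 (PySem.List.pyGetD d lohi.1 0 + 1)
       PySem.List.pySetD d1 lohi.2 (PySem.List.pyGetD d1 lohi.2 0 - 1))
      = pvSweep 0 d + |nxt - cur| := by
  have hcur : cur = ((cur.toNat : Nat) : Int) := (Int.toNat_of_nonneg hc0).symm
  have hnxt : nxt = ((nxt.toNat : Nat) : Int) := (Int.toNat_of_nonneg hn0).symm
  by_cases hle : cur ≤ nxt
  · simp only [hle, if_pos]
    rw [hcur, hnxt]
    simp only [PySem.List.pySetD_natCast, PySem.List.pyGetD_natCast,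
      List.getD_eq_getElem _ _ hcl, sub_eq_add_neg]
    rw [List.getD_eq_getElem _ _ (show nxt.toNat < (d.set cur.toNat (d[cur.toNat] + 1)).length by
          simpa using hnl),
        pv_set2_sweep d cur.toNat nxt.toNat hcl hnl]
    rw [← sub_eq_add_neg, abs_of_nonneg (by omega : (0:Int) ≤ ((nxt.toNat : Nat) : Int) - ((cur.toNat : Nat) : Int))]
  · simp only [hle, if_neg, not_false_iff]
    rw [hcur, hnxt]
    simp only [PySem.List.pySetD_natCast, PySem.List.pyGetD_natCast,
      List.getD_eq_getElem _ _ hnl, sub_eq_add_neg]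
    rw [List.getD_eq_getElem _ _ (show cur.toNat < (d.set nxt.toNat (d[nxt.toNat] + 1)).length by
          simpa using hcl),
        pv_set2_sweep d nxt.toNat cur.toNat hnl hcl]
    rw [← sub_eq_add_neg, abs_of_nonpos (by omega : ((nxt.toNat : Nat) : Int) - ((cur.toNat : Nat) : Int) ≤ 0)]
    ring

-- values looked up in pvIndexMap are bounded by the layout length
theorem pv_fold_getD_bound : ∀ (l : List Char) (s : Int) (d : PySem.Dict Char Int) (B : Int) (ch : Char),
    0 ≤ s → 0 ≤ d.getD ch 0 → d.getD ch 0 ≤ B → s + l.length ≤ B + 1 →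
    0 ≤ ((PySem.List.enumerate l s).foldl (fun d p => d.insert p.2 p.1) d).getD ch 0 ∧
      ((PySem.List.enumerate l s).foldl (fun d p => d.insert p.2 p.1) d).getD ch 0 ≤ B := by
  intro l
  induction l with
  | nil => intro s d B ch _ h1 h2 _; simpa [PySem.List.enumerate] using ⟨h1, h2⟩
  | cons x xs ih =>
      intro s d B ch hs h1 h2 hB
      rw [PySem.List.enumerate_cons]
      simp only [List.foldl_cons]
      refine ih (s + 1) (d.insert x s) B ch (by omega) ?_ ?_ (by simp only [List.length_cons] at hB; push_cast at hB ⊢; omega)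
      · rw [PySem.Dict.getD_insert]
        split_ifs with hx
        · omega
        · exact h1
      · rw [PySem.Dict.getD_insert]
        split_ifs with hx
        · simp only [List.length_cons] at hB; push_cast at hB; omega
        · exact h2

theorem pv_indexMap_bound (station_layout : String) (ch : Char) :
    0 ≤ (pvIndexMap station_layout).getD ch 0 ∧
      (pvIndexMap station_layout).getD ch 0 ≤ station_layout.toList.length := by
  unfold pvIndexMap
  exact pv_fold_getD_bound station_layout.toList 0 PySem.Dict.empty station_layout.toList.length ch
    (by omega) (by simp) (by simp) (by omega)

-- the main invariant: B's difference-array fold accumulates A's running sum in the sweep total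
theorem pv_main (f : Char → Int) : ∀ (l : List Char) (d : List Int) (cur : Int),
    0 ≤ cur → cur.toNat < d.length →
    (∀ ch, 0 ≤ f ch ∧ (f ch).toNat < d.length) →
    pvSweep 0
      ((l.foldl
        (fun (s : List Int × Int) ch =>
          let nxt := f ch
          let lohi := if s.2 ≤ nxt then (s.2, nxt) else (nxt, s.2)
          let d1 := PySem.List.pySetD s.1 lohi.1 (PySem.List.pyGetD s.1 lohi.1 0 + 1)
          let d2 := PySem.List.pySetD d1 lohi.2 (PySem.List.pyGetD d1 lohi.2 0 - 1)
          (d2, nxt)) (d, cur)).1)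
      = pvSweep 0 d + (l.foldl (fun (s : Int × Int) ch => (s.1 + |f ch - s.2|, f ch)) (0, cur)).1 := by
  intro l
  induction l with
  | nil => intro d cur _ _ _; simp
  | cons ch rest ih =>
      intro d cur hc0 hcl hf
      simp only [List.foldl_cons]
      rw [ih _ (f ch) (hf ch).1
            (by simpa [PySem.List.length_pySetD] using (hf ch).2)
            (fun c => by simpa [PySem.List.length_pySetD] using hf c),
          pv_move_sweep d cur (f ch) hc0 hcl (hf ch).1 (hf ch).2,
          pv_afold_shift f rest (0 + |f ch - cur|) (f ch)]
      ring

-- ===== VERDICT (by name: the statement is the Claim_ definition above) =====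
theorem navigate_research_station_spec : Claim_equal_navigate_research_station := by
  intro station_layout observations _ _
  unfold Spec_navigate_research_station navigate_research_station navigate_research_station_alt
  show (observations.toList.foldl
          (fun (s : Int × Int) ch =>
            (s.1 + |(pvIndexMap station_layout).getD ch 0 - s.2|,
              (pvIndexMap station_layout).getD ch 0)) (0, 0)).1
      = (((observations.toList.foldl
            (fun (s : List Int × Int) ch =>
              let nxt := (pvIndexMap station_layout).getD ch 0
              let lohi := if s.2 ≤ nxt then (s.2, nxt) else (nxt, s.2)
              let d1 := PySem.List.pySetD s.1 lohi.1 (PySem.List.pyGetD s.1 lohi.1 0 + 1)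
              let d2 := PySem.List.pySetD d1 lohi.2 (PySem.List.pyGetD d1 lohi.2 0 - 1)
              (d2, nxt)) (List.replicate (station_layout.toList.length + 1) 0, 0)).1).foldl
          (fun (p : Int × Int) x => (p.1 + x, p.2 + (p.1 + x))) (0, 0)).2
  rw [pv_sweep_foldl]
  rw [pv_main (fun ch => (pvIndexMap station_layout).getD ch 0) observations.toList
        (List.replicate (station_layout.toList.length + 1) 0) 0 (by omega)
        (by simp)
        (fun c => ⟨(pv_indexMap_bound station_layout c).1, by
          have h := pv_indexMap_bound station_layout c
          simp only [List.length_replicate]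
          omega⟩)]
  rw [pv_sweep_replicate_zero]
  ring
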